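-- pv_equiv track=rewrite | github.com/Mohan24047/SMART_EXAM | question_engine.py | detect_topics
-- ===== SOURCE A (Python) =====
-- from typing import Any
--
-- TOPIC_KEYWORDS: dict[str, list[str]] = {
--     "physics": [
--         "Electrostatics", "Current Electricity", "Magnetism", "Electromagnetic Induction",
--         "Electromagnetic Waves", "Optics", "Modern Physics", "Photoelectric",
--         "Semiconductor", "Wave Optics", "Ray Optics", "Thermodynamics",
--         "Kinetic Theory", "Gravitation", "Oscillations", "Waves",
--         "Rotational Motion", "Moment of Inertia", "Fluid Mechanics",
--         "Surface Tension", "Viscosity", "Elasticity", "Friction",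
--         "Newton's Laws", "Work Energy", "Projectile", "Kinematics",
--         "Units and Dimensions", "Nuclear Physics", "Radioactivity",
--         "Capacitor", "Resistance", "Magnetic Field", "Alternating Current",
--         "Lens", "Mirror", "Diffraction", "Interference", "Polarization",
--         "Simple Harmonic Motion",
--     ],
--     "chemistry": [
--         "Organic Chemistry", "Inorganic Chemistry", "Physical Chemistry",
--         "Thermodynamics", "Chemical Kinetics", "Equilibrium",
--         "Electrochemistry", "Coordination Compounds", "Atomic Structure",
--         "Chemical Bonding", "Periodic Table", "Solutions", "Solid State",
--         "Surface Chemistry", "Polymers", "Biomolecules", "Hydrocarbons",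
--         "Alkyl Halide", "Alcohol", "Phenol", "Ether", "Aldehyde",
--         "Ketone", "Carboxylic Acid", "Amine", "p-Block", "d-Block",
--         "s-Block", "Metallurgy", "Redox", "Mole Concept", "Stoichiometry",
--         "Isomerism", "GOC", "Benzene", "Aromatic", "Nuclear Magnetic",
--         "Enthalpy", "Entropy", "Gibbs",
--     ],
--     "mathematics": [
--         "Calculus", "Integration", "Differentiation", "Differential Equations",
--         "Limits", "Continuity", "Coordinate Geometry", "Straight Lines",
--         "Circle", "Parabola", "Ellipse", "Hyperbola", "Conic Sections",
--         "Matrices", "Determinants", "Vectors", "Three Dimensional",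
--         "3D Geometry", "Probability", "Statistics", "Permutations",
--         "Combinations", "Binomial Theorem", "Sequences", "Series",
--         "Arithmetic Progression", "Geometric Progression", "Trigonometry",
--         "Complex Numbers", "Quadratic", "Sets", "Relations", "Functions",
--         "Mathematical Induction", "Linear Programming", "Logarithm",
--         "Area Under Curve", "Definite Integral", "Indefinite Integral",
--         "Maxima", "Minima",
--     ],
-- }
--
-- def detect_topics(all_questions: list[dict[str, Any]]) -> dict[str, list[tuple[str, int]]]:
--     topic_counts: dict[str, dict[str, int]] = {
--         subj: {kw: 0 for kw in keywords}
--         for subj, keywords in TOPIC_KEYWORDS.items()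
--     }
--
--     for q in all_questions:
--         text = (q.get("question", "") or "").lower()
--         subject = (q.get("subject", "") or "").lower()
--
--         subjects_to_check: list[str] = [subject] if subject in topic_counts else list(TOPIC_KEYWORDS.keys())
--
--         for subj in subjects_to_check:
--             for keyword in TOPIC_KEYWORDS[subj]:
--                 if keyword.lower() in text:
--                     topic_counts[subj][keyword] += 1
--
--     result: dict[str, list[tuple[str, int]]] = {}
--     for subj, counts in topic_counts.items():
--         sorted_topics = sorted(counts.items(), key=lambda x: x[1], reverse=True)
--         result[subj] = [(topic, count) for topic, count in sorted_topics if count > 0]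
--
--     return result
-- ===== SOURCE B (Python) =====
-- from typing import Any
--
-- TOPIC_KEYWORDS: dict[str, list[str]] = {
--     "physics": [
--         "Electrostatics", "Current Electricity", "Magnetism", "Electromagnetic Induction",
--         "Electromagnetic Waves", "Optics", "Modern Physics", "Photoelectric",
--         "Semiconductor", "Wave Optics", "Ray Optics", "Thermodynamics",
--         "Kinetic Theory", "Gravitation", "Oscillations", "Waves",
--         "Rotational Motion", "Moment of Inertia", "Fluid Mechanics",
--         "Surface Tension", "Viscosity", "Elasticity", "Friction",
--         "Newton's Laws", "Work Energy", "Projectile", "Kinematics",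
--         "Units and Dimensions", "Nuclear Physics", "Radioactivity",
--         "Capacitor", "Resistance", "Magnetic Field", "Alternating Current",
--         "Lens", "Mirror", "Diffraction", "Interference", "Polarization",
--         "Simple Harmonic Motion",
--     ],
--     "chemistry": [
--         "Organic Chemistry", "Inorganic Chemistry", "Physical Chemistry",
--         "Thermodynamics", "Chemical Kinetics", "Equilibrium",
--         "Electrochemistry", "Coordination Compounds", "Atomic Structure",
--         "Chemical Bonding", "Periodic Table", "Solutions", "Solid State",
--         "Surface Chemistry", "Polymers", "Biomolecules", "Hydrocarbons",
--         "Alkyl Halide", "Alcohol", "Phenol", "Ether", "Aldehyde",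
--         "Ketone", "Carboxylic Acid", "Amine", "p-Block", "d-Block",
--         "s-Block", "Metallurgy", "Redox", "Mole Concept", "Stoichiometry",
--         "Isomerism", "GOC", "Benzene", "Aromatic", "Nuclear Magnetic",
--         "Enthalpy", "Entropy", "Gibbs",
--     ],
--     "mathematics": [
--         "Calculus", "Integration", "Differentiation", "Differential Equations",
--         "Limits", "Continuity", "Coordinate Geometry", "Straight Lines",
--         "Circle", "Parabola", "Ellipse", "Hyperbola", "Conic Sections",
--         "Matrices", "Determinants", "Vectors", "Three Dimensional",
--         "3D Geometry", "Probability", "Statistics", "Permutations",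
--         "Combinations", "Binomial Theorem", "Sequences", "Series",
--         "Arithmetic Progression", "Geometric Progression", "Trigonometry",
--         "Complex Numbers", "Quadratic", "Sets", "Relations", "Functions",
--         "Mathematical Induction", "Linear Programming", "Logarithm",
--         "Area Under Curve", "Definite Integral", "Indefinite Integral",
--         "Maxima", "Minima",
--     ],
-- }
--
-- def detect_topics(all_questions: list[dict[str, Any]]) -> dict[str, list[tuple[str, int]]]:
--     # Bucket the lowered question texts per subject first, then count each keyword once per bucket.
--     subjects = list(TOPIC_KEYWORDS.keys())
--     buckets: dict[str, list[str]] = {s: [] for s in subjects}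
--     for q in all_questions:
--         text = (q.get("question", "") or "").lower()
--         subject = (q.get("subject", "") or "").lower()
--         targets = [subject] if subject in buckets else subjects
--         for s in targets:
--             buckets[s].append(text)
--
--     result: dict[str, list[tuple[str, int]]] = {}
--     for s in subjects:
--         texts = buckets[s]
--         pairs = [(kw, sum(kw.lower() in t for t in texts)) for kw in TOPIC_KEYWORDS[s]]
--         pairs.sort(key=lambda p: p[1], reverse=True)
--         result[s] = [(kw, c) for kw, c in pairs if c > 0]
--     return result
-- ===== Notes on version B (the rewrite author's own statement) =====
-- stated objective: alternative
-- what changed: A scans every keyword of the relevant subjects per question and updates nested counter dicts; B first buckets the lowered question texts per subject and then computes each keyword's count in one countP/sum pass over its subject's bucket, keeping the same stable count-descending sort and positive filter.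
import Mathlib
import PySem

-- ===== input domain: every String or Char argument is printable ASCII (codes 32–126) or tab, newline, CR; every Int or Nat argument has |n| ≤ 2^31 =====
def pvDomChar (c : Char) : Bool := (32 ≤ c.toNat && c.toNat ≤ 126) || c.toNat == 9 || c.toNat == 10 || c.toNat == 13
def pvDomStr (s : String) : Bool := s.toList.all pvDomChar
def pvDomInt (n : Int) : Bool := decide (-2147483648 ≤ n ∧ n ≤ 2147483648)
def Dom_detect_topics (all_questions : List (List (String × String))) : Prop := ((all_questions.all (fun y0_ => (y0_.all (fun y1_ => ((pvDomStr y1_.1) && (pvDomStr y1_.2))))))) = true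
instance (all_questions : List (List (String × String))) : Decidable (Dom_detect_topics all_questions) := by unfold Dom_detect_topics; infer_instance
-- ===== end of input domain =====

-- B replaces A's per-question scan over every keyword (updating nested counter dicts) by a
-- bucket-then-count decomposition: first group the lowered texts per subject, then count each
-- keyword once over its subject's bucket (objective: alternative decomposition, same cost).

-- module constant TOPIC_KEYWORDS (shared context of both implementations)
def kwPhys : List String := ["Electrostatics", "Current Electricity", "Magnetism", "Electromagnetic Induction", "Electromagnetic Waves", "Optics", "Modern Physics", "Photoelectric", "Semiconductor", "Wave Optics", "Ray Optics", "Thermodynamics", "Kinetic Theory", "Gravitation", "Oscillations", "Waves", "Rotational Motion", "Moment of Inertia", "Fluid Mechanics", "Surface Tension", "Viscosity", "Elasticity", "Friction", "Newton's Laws", "Work Energy", "Projectile", "Kinematics", "Units and Dimensions", "Nuclear Physics", "Radioactivity", "Capacitor", "Resistance", "Magnetic Field", "Alternating Current", "Lens", "Mirror", "Diffraction", "Interference", "Polarization", "Simple Harmonic Motion"]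
def kwChem : List String := ["Organic Chemistry", "Inorganic Chemistry", "Physical Chemistry", "Thermodynamics", "Chemical Kinetics", "Equilibrium", "Electrochemistry", "Coordination Compounds", "Atomic Structure", "Chemical Bonding", "Periodic Table", "Solutions", "Solid State", "Surface Chemistry", "Polymers", "Biomolecules", "Hydrocarbons", "Alkyl Halide", "Alcohol", "Phenol", "Ether", "Aldehyde", "Ketone", "Carboxylic Acid", "Amine", "p-Block", "d-Block", "s-Block", "Metallurgy", "Redox", "Mole Concept", "Stoichiometry", "Isomerism", "GOC", "Benzene", "Aromatic", "Nuclear Magnetic", "Enthalpy", "Entropy", "Gibbs"]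
def kwMath : List String := ["Calculus", "Integration", "Differentiation", "Differential Equations", "Limits", "Continuity", "Coordinate Geometry", "Straight Lines", "Circle", "Parabola", "Ellipse", "Hyperbola", "Conic Sections", "Matrices", "Determinants", "Vectors", "Three Dimensional", "3D Geometry", "Probability", "Statistics", "Permutations", "Combinations", "Binomial Theorem", "Sequences", "Series", "Arithmetic Progression", "Geometric Progression", "Trigonometry", "Complex Numbers", "Quadratic", "Sets", "Relations", "Functions", "Mathematical Induction", "Linear Programming", "Logarithm", "Area Under Curve", "Definite Integral", "Indefinite Integral", "Maxima", "Minima"]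
def topicKeywords : PySem.Dict String (List String) :=
  PySem.Dict.ofList [("physics", kwPhys), ("chemistry", kwChem), ("mathematics", kwMath)]

-- ===== PORT A =====
-- literal port of A; q.get(k, "") or "" is (PySem.Dict.mk q).getD k "" (the 'or ""' is the
-- identity here since the default is already ""); TOPIC_KEYWORDS[subj] is getD subj [] (subj is
-- always a key where it is looked up, so no KeyError arises and A is total).
def detect_topics (all_questions : List (List (String × String))) : List (String × List (String × Int)) :=
  let topic_counts : PySem.Dict String (PySem.Dict String Int) :=
    PySem.Dict.ofList (topicKeywords.items.map (fun p =>
      (p.1, PySem.Dict.ofList (p.2.map (fun kw => (kw, (0 : Int)))))))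
  let topic_counts := all_questions.foldl (fun tc q =>
    let text := PySem.Str.lower ((PySem.Dict.mk q).getD "question" "")
    let subject := PySem.Str.lower ((PySem.Dict.mk q).getD "subject" "")
    let subjects_to_check := if tc.contains subject then [subject] else topicKeywords.keys
    subjects_to_check.foldl (fun tc subj =>
      (topicKeywords.getD subj []).foldl (fun tc kw =>
        if PySem.Str.isIn (PySem.Str.lower kw) text then
          tc.modify subj PySem.Dict.empty (fun cnts => cnts.modify kw 0 (· + 1))
        else tc) tc) tc) topic_counts
  topic_counts.items.foldl (fun result p =>
    let sorted_topics := PySem.List.sorted p.2.items (fun x => x.2) true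
    result ++ [(p.1, sorted_topics.filter (fun x => decide (x.2 > 0)))]) []

-- ===== PORT B =====
-- literal port of B (Source B): bucket lowered texts per subject, then count per keyword
-- (sum(kw.lower() in t for t in texts) is List.countP).
def detect_topics_alt (all_questions : List (List (String × String))) : List (String × List (String × Int)) :=
  let subjects := topicKeywords.keys
  let buckets0 : PySem.Dict String (List String) :=
    PySem.Dict.ofList (subjects.map (fun s => (s, ([] : List String))))
  let buckets := all_questions.foldl (fun b q =>
    let text := PySem.Str.lower ((PySem.Dict.mk q).getD "question" "")
    let subject := PySem.Str.lower ((PySem.Dict.mk q).getD "subject" "")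
    let targets := if b.contains subject then [subject] else subjects
    targets.foldl (fun b s => b.modify s [] (fun ts => ts ++ [text])) b) buckets0
  subjects.map (fun s =>
    let texts := buckets.getD s []
    let pairs := (topicKeywords.getD s []).map (fun kw =>
      (kw, ((texts.countP (fun t => PySem.Str.isIn (PySem.Str.lower kw) t) : Nat) : Int)))
    (s, (PySem.List.sorted pairs (fun x => x.2) true).filter (fun x => decide (x.2 > 0))))

-- ===== PRECONDITION & SPEC =====
def Spec_detect_topics (all_questions : List (List (String × String))) (out : List (String × List (String × Int))) : Prop := out = detect_topics_alt all_questions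
instance (all_questions : List (List (String × String))) (out : List (String × List (String × Int))) : Decidable (Spec_detect_topics all_questions out) := by unfold Spec_detect_topics; infer_instance

-- ===== CLAIM (what is proved, stated in full; the proofs are below) =====
def Claim_equal_detect_topics : Prop := ∀ (all_questions : List (List (String × String))), Dom_detect_topics all_questions → Spec_detect_topics all_questions (detect_topics all_questions)

-- ===== LEMMAS AND PROOFS =====

-- abbreviations for the common per-question data
def pvText (q : List (String × String)) : String := PySem.Str.lower ((PySem.Dict.mk q).getD "question" "")
def pvSubj (q : List (String × String)) : String := PySem.Str.lower ((PySem.Dict.mk q).getD "subject" "")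
-- does question q's scan reach subject s?
def pvChk (q : List (String × String)) (s : String) : Bool :=
  if pvSubj q == "physics" || pvSubj q == "chemistry" || pvSubj q == "mathematics" then pvSubj q == s else true
def pvHit (q : List (String × String)) (s kw : String) : Bool :=
  pvChk q s && PySem.Str.isIn (PySem.Str.lower kw) (pvText q)
def pvCnt (qs : List (List (String × String))) (s kw : String) : Int :=
  (qs.countP (fun q => pvHit q s kw) : Nat)
def pvTexts (qs : List (List (String × String))) (s : String) : List String :=
  (qs.filter (fun q => pvChk q s)).map pvText

-- dictionary shapes the two folds maintain
def dOf (K : List String) (f : String → Int) : PySem.Dict String Int :=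
  PySem.Dict.mk (K.map (fun kw => (kw, f kw)))
def Mk3 {α : Type} (a b c : α) : PySem.Dict String α :=
  PySem.Dict.mk [("physics", a), ("chemistry", b), ("mathematics", c)]
def stA (f : String → String → Int) : PySem.Dict String (PySem.Dict String Int) :=
  Mk3 (dOf kwPhys (f "physics")) (dOf kwChem (f "chemistry")) (dOf kwMath (f "mathematics"))
def stB (g : String → List String) : PySem.Dict String (List String) :=
  Mk3 (g "physics") (g "chemistry") (g "mathematics")

-- the two loop bodies, named (definitionally equal to the lambdas in the ports)
def stepFnA (tc : PySem.Dict String (PySem.Dict String Int)) (q : List (String × String)) :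
    PySem.Dict String (PySem.Dict String Int) :=
  let text := PySem.Str.lower ((PySem.Dict.mk q).getD "question" "")
  let subject := PySem.Str.lower ((PySem.Dict.mk q).getD "subject" "")
  let subjects_to_check := if tc.contains subject then [subject] else topicKeywords.keys
  subjects_to_check.foldl (fun tc subj =>
    (topicKeywords.getD subj []).foldl (fun tc kw =>
      if PySem.Str.isIn (PySem.Str.lower kw) text then
        tc.modify subj PySem.Dict.empty (fun cnts => cnts.modify kw 0 (· + 1))
      else tc) tc) tc
def stepFnB (b : PySem.Dict String (List String)) (q : List (String × String)) :
    PySem.Dict String (List String) :=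
  let text := PySem.Str.lower ((PySem.Dict.mk q).getD "question" "")
  let subject := PySem.Str.lower ((PySem.Dict.mk q).getD "subject" "")
  let targets := if b.contains subject then [subject] else topicKeywords.keys
  targets.foldl (fun b s => b.modify s [] (fun ts => ts ++ [text])) b

theorem mk3_contains {α : Type} (a b c : α) (s : String) :
    (Mk3 a b c).contains s = (s == "physics" || s == "chemistry" || s == "mathematics") := by
  simp [Mk3, PySem.Dict.contains]
  cases h1 : s == "physics" <;> cases h2 : s == "chemistry" <;> cases h3 : s == "mathematics" <;>
    simp_all [BEq.comm]

theorem mk3_modify_phys {α : Type} (a b c : α) (d0 : α) (F : α → α) :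
    (Mk3 a b c).modify "physics" d0 F = Mk3 (F a) b c := by
  simp [Mk3, PySem.Dict.modify, PySem.Dict.insert, PySem.Dict.getD, PySem.Dict.get?, PySem.Dict.contains]

theorem mk3_modify_chem {α : Type} (a b c : α) (d0 : α) (F : α → α) :
    (Mk3 a b c).modify "chemistry" d0 F = Mk3 a (F b) c := by
  simp [Mk3, PySem.Dict.modify, PySem.Dict.insert, PySem.Dict.getD, PySem.Dict.get?, PySem.Dict.contains]

theorem mk3_modify_math {α : Type} (a b c : α) (d0 : α) (F : α → α) :
    (Mk3 a b c).modify "mathematics" d0 F = Mk3 a b (F c) := by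
  simp [Mk3, PySem.Dict.modify, PySem.Dict.insert, PySem.Dict.getD, PySem.Dict.get?, PySem.Dict.contains]

theorem mk3_getD {α : Type} (a b c : α) (s : String) (d0 : α) (hs : s = "physics" ∨ s = "chemistry" ∨ s = "mathematics") :
    (Mk3 a b c).getD s d0 = if s = "physics" then a else if s = "chemistry" then b else c := by
  rcases hs with h | h | h <;> subst h <;>
    simp [Mk3, PySem.Dict.getD, PySem.Dict.get?]

theorem mk3_congr {α : Type} {a b c a' b' c' : α} (ha : a = a') (hb : b = b') (hc : c = c') :
    Mk3 a b c = Mk3 a' b' c' := by rw [ha, hb, hc]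

-- the inner keyword loop on a dict of shape dOf K f, pointwise
theorem cntFold_getD (L : List String) (g : String → Bool) :
    ∀ (d : PySem.Dict String Int) (v : String),
      (L.foldl (fun d kw => if g kw then d.modify kw 0 (· + 1) else d) d).getD v 0
        = d.getD v 0 + ((L.countP (fun kw => g kw && kw == v) : Nat) : Int) := by
  induction L with
  | nil => intro d v; simp
  | cons kw L ih =>
    intro d v
    rw [List.foldl_cons, List.countP_cons]
    by_cases hg : g kw
    · rw [if_pos hg, ih, PySem.Dict.getD_modify]
      by_cases hv : v = kw
      · subst hv; simp [hg]; omega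
      · have : (kw == v) = false := by simp [Ne.symm hv]
        simp [hg, this, hv]
    · rw [if_neg hg, ih]
      simp [hg]

theorem cntFold_keys (L : List String) (g : String → Bool) :
    ∀ (d : PySem.Dict String Int), (∀ kw ∈ L, d.contains kw = true) →
      (L.foldl (fun d kw => if g kw then d.modify kw 0 (· + 1) else d) d).keys = d.keys := by
  induction L with
  | nil => intro d _; rfl
  | cons kw L ih =>
    intro d hd
    rw [List.foldl_cons]
    by_cases hg : g kw
    · rw [if_pos hg]
      have hc : d.contains kw = true := hd kw (List.mem_cons_self)
      have hk : (d.modify kw 0 (· + 1)).keys = d.keys := by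
        rw [PySem.Dict.keys_modify, PySem.Dict.keys_insert_of_contains _ _ hc]
      rw [ih]
      · exact hk
      · intro x hx
        rw [PySem.Dict.contains_modify]
        rcases hd x (List.mem_cons_of_mem _ hx) with h
        simp [h]
    · rw [if_neg hg]; exact ih d (fun x hx => hd x (List.mem_cons_of_mem _ hx))

theorem countP_and_beq (K : List String) (g : String → Bool) (v : String) :
    K.countP (fun kw => g kw && kw == v) = if g v then K.count v else 0 := by
  induction K with
  | nil => simp
  | cons kw K ih =>
    rw [List.countP_cons, List.count_cons, ih]
    by_cases hv : kw = v
    · subst hv; by_cases hg : g kw <;> simp [hg]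
    · have : (kw == v) = false := by simp [hv]
      simp [this]

theorem dOf_keys (K : List String) (f : String → Int) : (dOf K f).keys = K := by
  show List.map (fun x => x.1) (List.map (fun kw => (kw, f kw)) K) = K
  rw [List.map_map]
  exact (List.map_congr_left fun a _ => rfl).trans (List.map_id _)

theorem dOf_getD (K : List String) (f : String → Int) (v : String) (hv : v ∈ K) (hK : K.Nodup) :
    (dOf K f).getD v 0 = f v := by
  apply PySem.Dict.getD_of_mem_items
  · exact List.mem_map.mpr ⟨v, hv, rfl⟩
  · rw [dOf_keys]; exact hK

theorem cntFold_dOf (K : List String) (hK : K.Nodup) (f : String → Int) (g : String → Bool) :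
    K.foldl (fun d kw => if g kw then d.modify kw 0 (· + 1) else d) (dOf K f)
      = dOf K (fun kw => f kw + if g kw then 1 else 0) := by
  apply PySem.Dict.ext
  have hkeys : (K.foldl (fun d kw => if g kw then d.modify kw 0 (· + 1) else d) (dOf K f)).keys = K := by
    rw [cntFold_keys K g (dOf K f) ?_, dOf_keys]
    intro kw hkw
    rw [PySem.Dict.contains_iff_mem_keys, dOf_keys]; exact hkw
  rw [PySem.Dict.items_eq_map_keys _ (by rw [hkeys]; exact hK) 0, hkeys]
  have : (dOf K (fun kw => f kw + if g kw then 1 else 0)).items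
      = K.map (fun v => (v, f v + if g v then 1 else 0)) := rfl
  rw [this]
  apply List.map_congr_left
  intro v hv
  rw [cntFold_getD, dOf_getD K f v hv hK, countP_and_beq]
  by_cases hg : g v
  · simp [hg, List.count_eq_one_of_mem hK hv]
  · simp [hg]

-- the outer subject fold threaded through position 1/2/3 of Mk3
theorem foldOuter_phys (L : List String) (g : String → Bool) (b c : PySem.Dict String Int) :
    ∀ a, L.foldl (fun tc kw => if g kw then tc.modify "physics" PySem.Dict.empty (fun d => d.modify kw 0 (· + 1)) else tc) (Mk3 a b c)
      = Mk3 (L.foldl (fun d kw => if g kw then d.modify kw 0 (· + 1) else d) a) b c := by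
  induction L with
  | nil => intro a; rfl
  | cons kw L ih =>
    intro a
    rw [List.foldl_cons, List.foldl_cons]
    by_cases hg : g kw
    · rw [if_pos hg, if_pos hg, mk3_modify_phys, ih]
    · rw [if_neg hg, if_neg hg, ih]

theorem foldOuter_chem (L : List String) (g : String → Bool) (a c : PySem.Dict String Int) :
    ∀ b, L.foldl (fun tc kw => if g kw then tc.modify "chemistry" PySem.Dict.empty (fun d => d.modify kw 0 (· + 1)) else tc) (Mk3 a b c)
      = Mk3 a (L.foldl (fun d kw => if g kw then d.modify kw 0 (· + 1) else d) b) c := by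
  induction L with
  | nil => intro b; rfl
  | cons kw L ih =>
    intro b
    rw [List.foldl_cons, List.foldl_cons]
    by_cases hg : g kw
    · rw [if_pos hg, if_pos hg, mk3_modify_chem, ih]
    · rw [if_neg hg, if_neg hg, ih]

theorem foldOuter_math (L : List String) (g : String → Bool) (a b : PySem.Dict String Int) :
    ∀ c, L.foldl (fun tc kw => if g kw then tc.modify "mathematics" PySem.Dict.empty (fun d => d.modify kw 0 (· + 1)) else tc) (Mk3 a b c)
      = Mk3 a b (L.foldl (fun d kw => if g kw then d.modify kw 0 (· + 1) else d) c) := by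
  induction L with
  | nil => intro c; rfl
  | cons kw L ih =>
    intro c
    rw [List.foldl_cons, List.foldl_cons]
    by_cases hg : g kw
    · rw [if_pos hg, if_pos hg, mk3_modify_math, ih]
    · rw [if_neg hg, if_neg hg, ih]

theorem kwPhys_nodup : kwPhys.Nodup := by decide
theorem kwChem_nodup : kwChem.Nodup := by decide
theorem kwMath_nodup : kwMath.Nodup := by decide
theorem tk_keys : topicKeywords.keys = ["physics", "chemistry", "mathematics"] := by decide
theorem tk_phys : topicKeywords.getD "physics" [] = kwPhys := by decide
theorem tk_chem : topicKeywords.getD "chemistry" [] = kwChem := by decide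
theorem tk_math : topicKeywords.getD "mathematics" [] = kwMath := by decide

theorem dOf_congr (K : List String) (f1 f2 : String → Int) (h : ∀ kw ∈ K, f1 kw = f2 kw) :
    dOf K f1 = dOf K f2 := by
  unfold dOf
  exact congrArg _ (List.map_congr_left fun a ha => by rw [h a ha])

theorem stA_congr (f1 f2 : String → String → Int)
    (h : ∀ s ∈ (["physics", "chemistry", "mathematics"] : List String), ∀ kw, f1 s kw = f2 s kw) :
    stA f1 = stA f2 := by
  unfold stA
  rw [dOf_congr kwPhys _ (f2 "physics") (fun kw _ => h "physics" (by simp) kw),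
      dOf_congr kwChem _ (f2 "chemistry") (fun kw _ => h "chemistry" (by simp) kw),
      dOf_congr kwMath _ (f2 "mathematics") (fun kw _ => h "mathematics" (by simp) kw)]

theorem pvHit_of_subj (q : List (String × String)) (s : String)
    (hs : pvSubj q = s) (hmem : s = "physics" ∨ s = "chemistry" ∨ s = "mathematics") (kw : String) :
    pvHit q s kw = PySem.Str.isIn (PySem.Str.lower kw) (pvText q) := by
  unfold pvHit pvChk
  rw [hs]
  rcases hmem with h | h | h <;> subst h <;> simp

theorem pvHit_of_subj_ne (q : List (String × String)) (s s' : String)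
    (hs : pvSubj q = s) (hmem : s = "physics" ∨ s = "chemistry" ∨ s = "mathematics")
    (hne : s ≠ s') (kw : String) : pvHit q s' kw = false := by
  unfold pvHit pvChk
  rw [hs]
  rcases hmem with h | h | h <;> subst h <;> simp_all
theorem pvHit_of_no_subj (q : List (String × String))
    (h1 : pvSubj q ≠ "physics") (h2 : pvSubj q ≠ "chemistry") (h3 : pvSubj q ≠ "mathematics")
    (s kw : String) : pvHit q s kw = PySem.Str.isIn (PySem.Str.lower kw) (pvText q) := by
  unfold pvHit pvChk
  simp [h1, h2, h3]

theorem stepA_eq (f : String → String → Int) (q : List (String × String)) :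
    stepFnA (stA f) q = stA (fun s kw => f s kw + if pvHit q s kw then 1 else 0) := by
  show (if (stA f).contains (pvSubj q) then [pvSubj q] else topicKeywords.keys).foldl
      (fun tc subj => (topicKeywords.getD subj []).foldl
        (fun tc kw => if PySem.Str.isIn (PySem.Str.lower kw) (pvText q) then
            tc.modify subj PySem.Dict.empty (fun cnts => cnts.modify kw 0 (· + 1)) else tc) tc)
      (stA f) = _
  rw [show stA f = Mk3 (dOf kwPhys (f "physics")) (dOf kwChem (f "chemistry")) (dOf kwMath (f "mathematics")) from rfl,
      mk3_contains, tk_keys]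
  by_cases h1 : pvSubj q = "physics"
  · rw [h1]
    simp only [List.foldl_cons, List.foldl_nil, BEq.rfl, Bool.true_or, if_true]
    rw [tk_phys, foldOuter_phys, cntFold_dOf kwPhys kwPhys_nodup]
    symm
    unfold stA
    refine mk3_congr ?_ ?_ ?_
    · refine dOf_congr _ _ _ (fun kw _ => ?_)
      beta_reduce
      rw [pvHit_of_subj q "physics" h1 (Or.inl rfl) kw]
    · refine dOf_congr _ _ _ (fun kw _ => ?_)
      beta_reduce
      rw [pvHit_of_subj_ne q "physics" "chemistry" h1 (Or.inl rfl) (by decide) kw]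
      simp
    · refine dOf_congr _ _ _ (fun kw _ => ?_)
      beta_reduce
      rw [pvHit_of_subj_ne q "physics" "mathematics" h1 (Or.inl rfl) (by decide) kw]
      simp
  · by_cases h2 : pvSubj q = "chemistry"
    · rw [h2]
      simp only [List.foldl_cons, List.foldl_nil, BEq.rfl, Bool.true_or, Bool.or_true, if_true]
      rw [tk_chem, foldOuter_chem, cntFold_dOf kwChem kwChem_nodup]
      symm
      unfold stA
      refine mk3_congr ?_ ?_ ?_
      · refine dOf_congr _ _ _ (fun kw _ => ?_)
        beta_reduce
        rw [pvHit_of_subj_ne q "chemistry" "physics" h2 (Or.inr (Or.inl rfl)) (by decide) kw]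
        simp
      · refine dOf_congr _ _ _ (fun kw _ => ?_)
        beta_reduce
        rw [pvHit_of_subj q "chemistry" h2 (Or.inr (Or.inl rfl)) kw]
      · refine dOf_congr _ _ _ (fun kw _ => ?_)
        beta_reduce
        rw [pvHit_of_subj_ne q "chemistry" "mathematics" h2 (Or.inr (Or.inl rfl)) (by decide) kw]
        simp
    · by_cases h3 : pvSubj q = "mathematics"
      · rw [h3]
        simp only [List.foldl_cons, List.foldl_nil, BEq.rfl, Bool.or_true, if_true]
        rw [tk_math, foldOuter_math, cntFold_dOf kwMath kwMath_nodup]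
        symm
        unfold stA
        refine mk3_congr ?_ ?_ ?_
        · refine dOf_congr _ _ _ (fun kw _ => ?_)
          beta_reduce
          rw [pvHit_of_subj_ne q "mathematics" "physics" h3 (Or.inr (Or.inr rfl)) (by decide) kw]
          simp
        · refine dOf_congr _ _ _ (fun kw _ => ?_)
          beta_reduce
          rw [pvHit_of_subj_ne q "mathematics" "chemistry" h3 (Or.inr (Or.inr rfl)) (by decide) kw]
          simp
        · refine dOf_congr _ _ _ (fun kw _ => ?_)
          beta_reduce
          rw [pvHit_of_subj q "mathematics" h3 (Or.inr (Or.inr rfl)) kw]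
      · have hc : (pvSubj q == "physics" || pvSubj q == "chemistry" || pvSubj q == "mathematics") = false := by
          simp [h1, h2, h3]
        rw [hc]
        simp only [List.foldl_cons, List.foldl_nil, if_false, Bool.false_eq_true]
        rw [tk_phys, tk_chem, tk_math, foldOuter_phys, foldOuter_chem, foldOuter_math,
            cntFold_dOf kwPhys kwPhys_nodup, cntFold_dOf kwChem kwChem_nodup,
            cntFold_dOf kwMath kwMath_nodup]
        symm
        unfold stA
        refine mk3_congr ?_ ?_ ?_ <;>
          exact dOf_congr _ _ _ (fun kw _ => by beta_reduce; rw [pvHit_of_no_subj q h1 h2 h3 _ kw])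

theorem pvChk_of_subj (q : List (String × String)) (s s' : String)
    (hs : pvSubj q = s) (hmem : s = "physics" ∨ s = "chemistry" ∨ s = "mathematics") :
    pvChk q s' = (s == s') := by
  unfold pvChk
  rw [hs]
  rcases hmem with h | h | h <;> subst h <;> simp

theorem stepB_eq (g : String → List String) (q : List (String × String)) :
    stepFnB (stB g) q = stB (fun s => g s ++ if pvChk q s then [pvText q] else []) := by
  show (if (stB g).contains (pvSubj q) then [pvSubj q] else topicKeywords.keys).foldl
      (fun b s => b.modify s [] (fun ts => ts ++ [pvText q])) (stB g) = _
  rw [show stB g = Mk3 (g "physics") (g "chemistry") (g "mathematics") from rfl, mk3_contains, tk_keys]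
  by_cases h1 : pvSubj q = "physics"
  · rw [h1]
    simp only [List.foldl_cons, List.foldl_nil, BEq.rfl, Bool.true_or, if_true]
    rw [mk3_modify_phys]
    symm
    unfold stB
    refine mk3_congr ?_ ?_ ?_
    · beta_reduce
      rw [pvChk_of_subj q "physics" "physics" h1 (Or.inl rfl)]
      simp
    · beta_reduce
      rw [pvChk_of_subj q "physics" "chemistry" h1 (Or.inl rfl)]
      simp
    · beta_reduce
      rw [pvChk_of_subj q "physics" "mathematics" h1 (Or.inl rfl)]
      simp
  · by_cases h2 : pvSubj q = "chemistry"
    · rw [h2]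
      simp only [List.foldl_cons, List.foldl_nil, BEq.rfl, Bool.true_or, Bool.or_true, if_true]
      rw [mk3_modify_chem]
      symm
      unfold stB
      refine mk3_congr ?_ ?_ ?_
      · beta_reduce
        rw [pvChk_of_subj q "chemistry" "physics" h2 (Or.inr (Or.inl rfl))]
        simp
      · beta_reduce
        rw [pvChk_of_subj q "chemistry" "chemistry" h2 (Or.inr (Or.inl rfl))]
        simp
      · beta_reduce
        rw [pvChk_of_subj q "chemistry" "mathematics" h2 (Or.inr (Or.inl rfl))]
        simp
    · by_cases h3 : pvSubj q = "mathematics"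
      · rw [h3]
        simp only [List.foldl_cons, List.foldl_nil, BEq.rfl, Bool.or_true, if_true]
        rw [mk3_modify_math]
        symm
        unfold stB
        refine mk3_congr ?_ ?_ ?_
        · beta_reduce
          rw [pvChk_of_subj q "mathematics" "physics" h3 (Or.inr (Or.inr rfl))]
          simp
        · beta_reduce
          rw [pvChk_of_subj q "mathematics" "chemistry" h3 (Or.inr (Or.inr rfl))]
          simp
        · beta_reduce
          rw [pvChk_of_subj q "mathematics" "mathematics" h3 (Or.inr (Or.inr rfl))]
          simp
      · have hc : (pvSubj q == "physics" || pvSubj q == "chemistry" || pvSubj q == "mathematics") = false := by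
          simp [h1, h2, h3]
        have hchk : ∀ s, pvChk q s = true := by
          intro s; unfold pvChk; simp [h1, h2, h3]
        rw [hc]
        simp only [List.foldl_cons, List.foldl_nil, if_false, Bool.false_eq_true]
        rw [mk3_modify_phys, mk3_modify_chem, mk3_modify_math]
        symm
        unfold stB
        refine mk3_congr ?_ ?_ ?_ <;> beta_reduce <;> rw [hchk] <;> simp

theorem foldA (qs : List (List (String × String))) :
    ∀ f, qs.foldl stepFnA (stA f) = stA (fun s kw => f s kw + pvCnt qs s kw) := by
  induction qs with
  | nil =>
    intro f
    rw [List.foldl_nil]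
    refine stA_congr _ _ (fun s _ kw => ?_)
    simp [pvCnt]
  | cons q qs ih =>
    intro f
    rw [List.foldl_cons, stepA_eq, ih]
    refine stA_congr _ _ (fun s _ kw => ?_)
    beta_reduce
    unfold pvCnt
    rw [List.countP_cons]
    by_cases h : pvHit q s kw
    · simp [h]
      ring
    · simp [h]

theorem foldB (qs : List (List (String × String))) :
    ∀ g, qs.foldl stepFnB (stB g) = stB (fun s => g s ++ pvTexts qs s) := by
  induction qs with
  | nil =>
    intro g
    rw [List.foldl_nil]
    unfold stB
    refine mk3_congr ?_ ?_ ?_ <;> simp [pvTexts]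
  | cons q qs ih =>
    intro g
    rw [List.foldl_cons, stepB_eq, ih]
    unfold stB
    have hstep : ∀ s, (g s ++ if pvChk q s then [pvText q] else []) ++ pvTexts qs s
        = g s ++ pvTexts (q :: qs) s := by
      intro s
      unfold pvTexts
      rw [List.filter_cons]
      by_cases h : pvChk q s <;> simp [h]
    refine mk3_congr ?_ ?_ ?_ <;> beta_reduce <;> rw [hstep]

theorem stB_getD_phys (g : String → List String) : (stB g).getD "physics" [] = g "physics" := by
  rw [show stB g = Mk3 (g "physics") (g "chemistry") (g "mathematics") from rfl,
      mk3_getD _ _ _ _ _ (Or.inl rfl)]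
  simp

theorem stB_getD_chem (g : String → List String) : (stB g).getD "chemistry" [] = g "chemistry" := by
  rw [show stB g = Mk3 (g "physics") (g "chemistry") (g "mathematics") from rfl,
      mk3_getD _ _ _ _ _ (Or.inr (Or.inl rfl))]
  simp

theorem stB_getD_math (g : String → List String) : (stB g).getD "mathematics" [] = g "mathematics" := by
  rw [show stB g = Mk3 (g "physics") (g "chemistry") (g "mathematics") from rfl,
      mk3_getD _ _ _ _ _ (Or.inr (Or.inr rfl))]
  simp

theorem cnt_eq (qs : List (List (String × String))) (s kw : String) :
    (((pvTexts qs s).countP (fun t => PySem.Str.isIn (PySem.Str.lower kw) t) : Nat) : Int)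
      = (0 : Int) + pvCnt qs s kw := by
  unfold pvTexts pvCnt
  rw [List.countP_map, List.countP_filter, zero_add]
  congr 1
  refine List.countP_congr (fun q _ => ?_)
  unfold pvHit
  simp [Function.comp]
  exact and_comm

def pvOut (K : List String) (f : String → Int) : List (String × Int) :=
  (PySem.List.sorted (K.map (fun kw => (kw, f kw))) (fun x => x.2) true).filter (fun x => decide (x.2 > 0))

theorem pvOut_congr (K : List String) (f1 f2 : String → Int) (h : ∀ kw ∈ K, f1 kw = f2 kw) :
    pvOut K f1 = pvOut K f2 := by
  unfold pvOut
  rw [List.map_congr_left fun kw hkw => by rw [h kw hkw]]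

-- ===== VERDICT (by name: the statement is the Claim_ definition above) =====
set_option maxRecDepth 100000 in
theorem detect_topics_spec : Claim_equal_detect_topics := by
  unfold Claim_equal_detect_topics Spec_detect_topics
  intro qs _
  have hinitA : (PySem.Dict.ofList (topicKeywords.items.map (fun p =>
      (p.1, PySem.Dict.ofList (p.2.map (fun kw => (kw, (0 : Int)))))))) = stA (fun _ _ => 0) := by decide
  have hinitB : (PySem.Dict.ofList (topicKeywords.keys.map (fun s => (s, ([] : List String)))))
      = stB (fun _ => []) := by decide
  have hA : detect_topics qs = [("physics", pvOut kwPhys (fun kw => 0 + pvCnt qs "physics" kw)),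
      ("chemistry", pvOut kwChem (fun kw => 0 + pvCnt qs "chemistry" kw)),
      ("mathematics", pvOut kwMath (fun kw => 0 + pvCnt qs "mathematics" kw))] := by
    show (qs.foldl stepFnA (PySem.Dict.ofList (topicKeywords.items.map (fun p =>
        (p.1, PySem.Dict.ofList (p.2.map (fun kw => (kw, (0 : Int))))))))).items.foldl
        (fun result p =>
          result ++ [(p.1, (PySem.List.sorted p.2.items (fun x => x.2) true).filter (fun x => decide (x.2 > 0)))])
        [] = _
    rw [hinitA, foldA qs]
    rfl
  have hB : detect_topics_alt qs = [("physics", pvOut kwPhys (fun kw =>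
        (((pvTexts qs "physics").countP (fun t => PySem.Str.isIn (PySem.Str.lower kw) t) : Nat) : Int))),
      ("chemistry", pvOut kwChem (fun kw =>
        (((pvTexts qs "chemistry").countP (fun t => PySem.Str.isIn (PySem.Str.lower kw) t) : Nat) : Int))),
      ("mathematics", pvOut kwMath (fun kw =>
        (((pvTexts qs "mathematics").countP (fun t => PySem.Str.isIn (PySem.Str.lower kw) t) : Nat) : Int)))] := by
    show topicKeywords.keys.map (fun s =>
        (s, (PySem.List.sorted ((topicKeywords.getD s []).map (fun kw =>
              (kw, (((qs.foldl stepFnB (PySem.Dict.ofList (topicKeywords.keys.map (fun s =>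
                  (s, ([] : List String)))))).getD s []).countP
                    (fun t => PySem.Str.isIn (PySem.Str.lower kw) t) : Int)))) (fun x => x.2) true).filter
            (fun x => decide (x.2 > 0)))) = _
    rw [hinitB, foldB qs, tk_keys]
    simp only [List.map_cons, List.map_nil]
    rw [stB_getD_phys, stB_getD_chem, stB_getD_math, tk_phys, tk_chem, tk_math]
    rfl
  rw [hA, hB,
      pvOut_congr kwPhys _ _ (fun kw _ => (cnt_eq qs "physics" kw).symm),
      pvOut_congr kwChem _ _ (fun kw _ => (cnt_eq qs "chemistry" kw).symm),
      pvOut_congr kwMath _ _ (fun kw _ => (cnt_eq qs "mathematics" kw).symm)]
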